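-- pv_equiv track=rewrite | github.com/pinotronic/LimpiandoTexto | Test.py | CargandoCasillas
-- ===== SOURCE A (Python) =====
-- def CargandoCasillas(texto):
--
--     Casilla6 = ""
--     Casilla5 = ""
--     Casilla4 = ""
--     Casilla3 = ""
--     Casilla2 = ""
--     Casilla1 = ""
--     Final = ""
--     TextoFinal = ""
--     texto = texto + "XXXXXX"
--
--     for letra in texto:
--         Final = Casilla6
--         Casilla6 = Casilla5
--         Casilla5 = Casilla4
--         Casilla4 = Casilla3
--         Casilla3 = Casilla2
--         Casilla2 = Casilla1
--         Casilla1 = letra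
--         if Casilla6 != "":
--             TextoFinal = TextoFinal + Final
--     return TextoFinal
-- ===== SOURCE B (Python) =====
-- def CargandoCasillas(texto):
--     # The 6-cell shift register padded with six trailing characters emits exactly the input.
--     return texto
-- ===== Notes on version B (the rewrite author's own statement) =====
-- stated objective: faster
-- what changed: The 6-cell shift register with six padding characters appended is the identity on strings, so B returns texto directly instead of simulating the register with repeated string concatenation.
import Mathlib
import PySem

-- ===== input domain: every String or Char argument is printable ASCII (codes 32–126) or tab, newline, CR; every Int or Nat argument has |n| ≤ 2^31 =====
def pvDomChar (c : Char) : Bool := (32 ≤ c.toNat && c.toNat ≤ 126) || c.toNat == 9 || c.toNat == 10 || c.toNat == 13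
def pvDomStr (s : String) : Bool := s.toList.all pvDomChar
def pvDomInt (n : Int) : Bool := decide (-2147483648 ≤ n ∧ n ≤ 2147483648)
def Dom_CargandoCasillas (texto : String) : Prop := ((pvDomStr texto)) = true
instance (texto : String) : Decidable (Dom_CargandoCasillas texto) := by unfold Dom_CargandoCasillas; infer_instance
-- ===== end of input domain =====

-- B returns texto directly: the 6-cell shift register flushed by the six-character pad emits exactly the input.

-- ===== PORT A =====
-- the for-loop of A: state = (Casilla6, Casilla5, Casilla4, Casilla3, Casilla2, Casilla1, Final, TextoFinal)
def pvLoopA : List Char → String → String → String → String → String → String → String → String → String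
  | [], _, _, _, _, _, _, _, acc => acc
  | letra :: rest, c6, c5, c4, c3, c2, c1, _fin, acc =>
      -- Final = Casilla6; Casilla6 = Casilla5; …; Casilla1 = letra; if Casilla6 != "": TextoFinal += Final
      pvLoopA rest c5 c4 c3 c2 c1 (String.singleton letra) c6
        (if c5 ≠ "" then acc ++ c6 else acc)

def CargandoCasillas (texto : String) : String :=
  pvLoopA (texto ++ "XXXXXX").toList "" "" "" "" "" "" "" ""

-- ===== PORT B =====
def CargandoCasillas_alt (texto : String) : String := texto

-- ===== PRECONDITION & SPEC =====
def Spec_CargandoCasillas (texto : String) (out : String) : Prop := out = CargandoCasillas_alt texto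
instance (texto : String) (out : String) : Decidable (Spec_CargandoCasillas texto out) := by unfold Spec_CargandoCasillas; infer_instance

-- ===== CLAIM (what is proved, stated in full; the proofs are below) =====
def Claim_equal_CargandoCasillas : Prop := ∀ (texto : String), Dom_CargandoCasillas texto → Spec_CargandoCasillas texto (CargandoCasillas texto)

-- ===== LEMMAS AND PROOFS =====

-- the register cells corresponding to a queue q of at most 6 buffered characters (newest last)
def pvCells : List Char → String × String × String × String × String × String
  | [] => ("", "", "", "", "", "")
  | [a] => ("", "", "", "", "", String.singleton a)
  | [a, b] => ("", "", "", "", String.singleton a, String.singleton b)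
  | [a, b, c] => ("", "", "", String.singleton a, String.singleton b, String.singleton c)
  | [a, b, c, d] => ("", "", String.singleton a, String.singleton b, String.singleton c, String.singleton d)
  | [a, b, c, d, e] => ("", String.singleton a, String.singleton b, String.singleton c, String.singleton d, String.singleton e)
  | a :: b :: c :: d :: e :: f :: _ => (String.singleton a, String.singleton b, String.singleton c, String.singleton d, String.singleton e, String.singleton f)

theorem pv_single (c : Char) : String.singleton c = String.ofList [c] := rfl

theorem pv_singleton_ne_empty (c : Char) : String.singleton c ≠ "" := by
  simp [String.singleton]

-- loop invariant: with queue q buffered in the cells and accumulator T, running the loop on l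
-- yields T followed by all but the last six characters of q ++ l
theorem pvLoopA_inv (l : List Char) : ∀ (q : List Char) (fin T : String),
    q.length ≤ 6 →
    pvLoopA l (pvCells q).1 (pvCells q).2.1 (pvCells q).2.2.1 (pvCells q).2.2.2.1
      (pvCells q).2.2.2.2.1 (pvCells q).2.2.2.2.2 fin T
      = T ++ String.ofList ((q ++ l).take (q.length + l.length - 6)) := by
  induction l with
  | nil =>
    intro q fin T hq
    simp [pvLoopA, Nat.sub_eq_zero_of_le (by simpa using hq)]
  | cons h t ih =>
    intro q fin T hq
    match q with
    | [] =>
      have := ih [h] "" T (by simp)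
      simp only [pvCells] at this
      simp only [pvLoopA, pvCells]
      rw [if_neg (by simp), this]
      simp only [List.cons_append, List.nil_append]
      congr 4
      simp
      omega
    | [a] =>
      have := ih [a, h] "" T (by simp)
      simp only [pvCells] at this
      simp only [pvLoopA, pvCells]
      rw [if_neg (by simp), this]
      simp only [List.cons_append, List.nil_append]
      congr 4
      simp
      omega
    | [a, b] =>
      have := ih [a, b, h] "" T (by simp)
      simp only [pvCells] at this
      simp only [pvLoopA, pvCells]
      rw [if_neg (by simp), this]
      simp only [List.cons_append, List.nil_append]
      congr 4
      simp
      omega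
    | [a, b, c] =>
      have := ih [a, b, c, h] "" T (by simp)
      simp only [pvCells] at this
      simp only [pvLoopA, pvCells]
      rw [if_neg (by simp), this]
      simp only [List.cons_append, List.nil_append]
      congr 4
      simp
      omega
    | [a, b, c, d] =>
      have := ih [a, b, c, d, h] "" T (by simp)
      simp only [pvCells] at this
      simp only [pvLoopA, pvCells]
      rw [if_neg (by simp), this]
      simp only [List.cons_append, List.nil_append]
      congr 4
      simp
      omega
    | [a, b, c, d, e] =>
      -- Casilla6 becomes nonempty here, but Final is still "" so the append is a no-op
      have := ih [a, b, c, d, e, h] "" (T ++ "") (by simp)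
      simp only [pvCells] at this
      simp only [pvLoopA, pvCells]
      rw [if_pos (pv_singleton_ne_empty a), this]
      simp only [List.cons_append, List.nil_append]
      simp only [String.append_empty]
      congr 4
      simp
      omega
    | [a, b, c, d, e, f] =>
      -- the register is full: the oldest character a is emitted
      have := ih [b, c, d, e, f, h] (String.singleton a) (T ++ String.singleton a) (by simp)
      simp only [pvCells] at this
      simp only [pvLoopA, pvCells]
      rw [if_pos (pv_singleton_ne_empty b), this]
      simp only [List.cons_append, List.nil_append, List.length_cons, List.length_nil]
      simp [pv_single, String.append_assoc, ← String.ofList_append]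
    | _ :: _ :: _ :: _ :: _ :: _ :: _ :: _ =>
      simp at hq
      omega

theorem CargandoCasillas_eq_id (texto : String) : CargandoCasillas texto = texto := by
  have h := pvLoopA_inv (texto ++ "XXXXXX").toList [] "" "" (by simp)
  simp only [pvCells, List.nil_append, List.length_nil, Nat.zero_add] at h
  unfold CargandoCasillas
  rw [h]
  have hl : (texto ++ "XXXXXX").toList = texto.toList ++ ['X','X','X','X','X','X'] := by simp
  rw [hl]
  simp

-- ===== VERDICT (by name: the statement is the Claim_ definition above) =====
theorem CargandoCasillas_spec : Claim_equal_CargandoCasillas := by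
  intro texto _
  unfold Spec_CargandoCasillas CargandoCasillas_alt
  exact CargandoCasillas_eq_id texto
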